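-- pv_equiv track=rewrite | github.com/yuus95/Algorithm | 복습폴더/브루트포스/3085 사탕게임/AA.py | make_sum
-- ===== SOURCE A (Python) =====
-- def make_sum(a,start_row, end_row, start_col,end_col):
--     n = len(a)
--     ans = 1
--     for i in range(start_row,end_row+1):
--         cnt = 1
--         for j in range(1,n):
--             if a[i][j] == a[i][j-1]:
--                 cnt += 1
--             else :
--                 cnt =1
--             if ans < cnt :
--                 ans = cnt
--     for i in range(start_col,end_col+1):
--         cnt = 1
--         for j in range(1,n):
--             if  a[j][i] == a[j-1][i]:
--                 cnt+=1
--             else: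
--                 cnt= 1
--             if ans < cnt:
--                 ans = cnt
--     return ans
-- ===== SOURCE B (Python) =====
-- def _run_lengths(line):
--     """Lengths of maximal runs of consecutive equal elements."""
--     runs = []
--     i, m = 0, len(line)
--     while i < m:
--         j = i
--         while j < m and line[j] == line[i]:
--             j += 1
--         runs.append(j - i)
--         i = j
--     return runs
--
--
-- def make_sum(a, start_row, end_row, start_col, end_col):
--     n = len(a)
--     if n < 2:
--         return 1
--     lines = [[a[i][j] for j in range(n)] for i in range(start_row, end_row + 1)]
--     lines += [[a[j][i] for j in range(n)] for i in range(start_col, end_col + 1)]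
--     best = 1
--     for line in lines:
--         for r in _run_lengths(line):
--             best = max(best, r)
--     return best
-- ===== Notes on version B (the rewrite author's own statement) =====
-- stated objective: alternative
-- what changed: A scans index pairs (j-1, j) with a manual run counter and running max; B builds each row/column line explicitly, run-length-encodes it with a nested two-pointer pass, and takes the max over the run lengths (returning 1 outright for grids with fewer than 2 rows, where no adjacent pair exists).
import Mathlib
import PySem

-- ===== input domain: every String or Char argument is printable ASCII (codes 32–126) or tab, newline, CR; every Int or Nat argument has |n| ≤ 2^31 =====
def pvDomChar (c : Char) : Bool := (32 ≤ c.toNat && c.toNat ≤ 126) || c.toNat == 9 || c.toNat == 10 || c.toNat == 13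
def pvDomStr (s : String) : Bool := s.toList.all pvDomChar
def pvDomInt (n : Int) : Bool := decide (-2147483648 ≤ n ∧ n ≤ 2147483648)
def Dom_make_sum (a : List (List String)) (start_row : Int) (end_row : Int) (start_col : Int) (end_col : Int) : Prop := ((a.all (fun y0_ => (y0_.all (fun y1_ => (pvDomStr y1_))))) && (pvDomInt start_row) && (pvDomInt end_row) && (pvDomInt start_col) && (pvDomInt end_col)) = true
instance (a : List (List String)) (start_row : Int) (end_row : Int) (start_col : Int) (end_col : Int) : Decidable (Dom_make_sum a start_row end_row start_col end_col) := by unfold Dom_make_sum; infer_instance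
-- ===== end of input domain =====

-- B replaces A's manual run-counter over index pairs by building each row/column line
-- explicitly and taking the max over its run-length encoding (objective: alternative).

-- shared cell getter: a[i][j] (Python semantics, negative indices wrap; total with a
-- default that Pre_ guarantees is never reached)
def getS (a : List (List String)) (i j : Int) : String :=
  PySem.List.pyGetD (PySem.List.pyGetD a i []) j ""

-- ===== PORT A =====
def make_sum (a : List (List String)) (start_row : Int) (end_row : Int) (start_col : Int) (end_col : Int) : Int :=
  (PySem.List.pyRange start_col (end_col + 1) 1).foldl (fun ans i =>
    ((PySem.List.pyRange 1 (a.length : Int) 1).foldl (fun (s : Int × Int) j =>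
      let cnt : Int := if getS a j i = getS a (j - 1) i then s.1 + 1 else 1
      (cnt, if s.2 < cnt then cnt else s.2)) (1, ans)).2)
    -- ans after the first (row) loop:
    ((PySem.List.pyRange start_row (end_row + 1) 1).foldl (fun ans i =>
      ((PySem.List.pyRange 1 (a.length : Int) 1).foldl (fun (s : Int × Int) j =>
        let cnt : Int := if getS a i j = getS a i (j - 1) then s.1 + 1 else 1
        (cnt, if s.2 < cnt then cnt else s.2)) (1, ans)).2) 1)

-- ===== PORT B =====
-- _run_lengths' inner while-loop: length of the leading run equal to x, and the rest
def headRun (x : String) : List String → Int × List String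
  | [] => (1, [])
  | y :: ys => if y = x then ((headRun x ys).1 + 1, (headRun x ys).2) else (1, y :: ys)

lemma headRun_rest_length (x : String) (l : List String) : (headRun x l).2.length ≤ l.length := by
  induction l with
  | nil => simp [headRun]
  | cons y ys ih =>
    simp only [headRun]
    split
    · simp only [List.length_cons]; omega
    · simp

-- _run_lengths: lengths of maximal runs of consecutive equal elements
def groupLens : List String → List Int
  | [] => []
  | x :: xs => (headRun x xs).1 :: groupLens (headRun x xs).2
termination_by l => l.length
decreasing_by
  have := headRun_rest_length x xs
  simp only [List.length_cons]; omega

def make_sum_alt (a : List (List String)) (start_row : Int) (end_row : Int) (start_col : Int) (end_col : Int) : Int :=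
  if (a.length : Int) < 2 then 1
  else
    ((PySem.List.pyRange start_row (end_row + 1) 1).map (fun i =>
        (PySem.List.pyRange 0 (a.length : Int) 1).map (fun j => getS a i j))
      ++ (PySem.List.pyRange start_col (end_col + 1) 1).map (fun i =>
        (PySem.List.pyRange 0 (a.length : Int) 1).map (fun j => getS a j i))).foldl
      (fun best line => (groupLens line).foldl (fun b r => max b r) best) 1

-- ===== PRECONDITION & SPEC =====
-- Pre_ is exactly the set of inputs on which Python A returns (no IndexError): when the
-- grid has ≥ 2 rows, every row index in [start_row, end_row] must be in range (negative
-- Python indices wrap) with that row at least n long, and every column index in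
-- [start_col, end_col] must be in range for every row.
def Pre_make_sum (a : List (List String)) (start_row : Int) (end_row : Int) (start_col : Int) (end_col : Int) : Prop :=
  2 ≤ a.length →
    ((start_row ≤ end_row →
        -(a.length : Int) ≤ start_row ∧ end_row < (a.length : Int) ∧
        ∀ p ∈ PySem.List.enumerate a 0,
          ((start_row ≤ p.1 ∧ p.1 ≤ end_row) ∨
           (start_row ≤ p.1 - (a.length : Int) ∧ p.1 - (a.length : Int) ≤ end_row)) →
          a.length ≤ p.2.length) ∧
     (start_col ≤ end_col →
        ∀ r ∈ a, -(r.length : Int) ≤ start_col ∧ end_col < (r.length : Int)))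
instance (a : List (List String)) (start_row : Int) (end_row : Int) (start_col : Int) (end_col : Int) : Decidable (Pre_make_sum a start_row end_row start_col end_col) := by unfold Pre_make_sum; infer_instance

def pvWitness_make_sum : List (List String) × Int × Int × Int × Int :=
  ([["x", "x"], ["x", "y"]], 0, 1, 0, 1)

def Spec_make_sum (a : List (List String)) (start_row : Int) (end_row : Int) (start_col : Int) (end_col : Int) (out : Int) : Prop := out = make_sum_alt a start_row end_row start_col end_col
instance (a : List (List String)) (start_row : Int) (end_row : Int) (start_col : Int) (end_col : Int) (out : Int) : Decidable (Spec_make_sum a start_row end_row start_col end_col out) := by unfold Spec_make_sum; infer_instance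

-- ===== CLAIM (what is proved, stated in full; the proofs are below) =====
def Claim_equal_make_sum : Prop := ∀ (a : List (List String)) (start_row : Int) (end_row : Int) (start_col : Int) (end_col : Int), Dom_make_sum a start_row end_row start_col end_col → Pre_make_sum a start_row end_row start_col end_col → Spec_make_sum a start_row end_row start_col end_col (make_sum a start_row end_row start_col end_col)

-- ===== LEMMAS AND PROOFS =====

-- A's inner counter loop, re-expressed as a recursion carrying the previous element
def scanA (prev : String) (cnt ans : Int) : List String → Int
  | [] => ans
  | y :: ys =>
    scanA y (if y = prev then cnt + 1 else 1)
      (if ans < (if y = prev then cnt + 1 else 1) then (if y = prev then cnt + 1 else 1) else ans) ys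

lemma headRun_fst_pos (x : String) (l : List String) : 1 ≤ (headRun x l).1 := by
  induction l with
  | nil => simp [headRun]
  | cons y ys ih =>
    simp only [headRun]
    split
    · simp only; omega
    · simp only; omega

-- A's index loop over j ∈ [k, k+m) equals scanA over the corresponding elements
lemma idx_scan (g : Int → String) (m : Nat) :
    ∀ (k cnt ans : Int),
      ((PySem.List.pyRange k (k + (m : Int)) 1).foldl (fun (s : Int × Int) j =>
        let c : Int := if g j = g (j - 1) then s.1 + 1 else 1
        (c, if s.2 < c then c else s.2)) (cnt, ans)).2
      = scanA (g (k - 1)) cnt ans ((PySem.List.pyRange k (k + (m : Int)) 1).map g) := by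
  induction m with
  | zero =>
    intro k cnt ans
    rw [PySem.List.pyRange_one_eq_nil (by omega)]
    simp [scanA]
  | succ m ih =>
    intro k cnt ans
    rw [PySem.List.pyRange_one_cons (by omega)]
    have h1 : k + ((m + 1 : Nat) : Int) = (k + 1) + (m : Int) := by push_cast; ring
    simp only [List.foldl_cons, List.map_cons, scanA, h1]
    have h2 : k + 1 - 1 = k := by ring
    rw [ih (k + 1)]
    rw [h2]

-- scanA across one maximal run: the running max only advances at the end of the run
lemma scan_run (M : List String) : ∀ (x : String) (cnt ans : Int), 1 ≤ cnt → cnt ≤ ans →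
    scanA x cnt ans M =
      (match (headRun x M).2 with
       | [] => max ans (cnt + (headRun x M).1 - 1)
       | y :: ys => scanA y 1 (max ans (cnt + (headRun x M).1 - 1)) ys) := by
  induction M with
  | nil =>
    intro x cnt ans h1 h2
    simp only [headRun, scanA]
    rw [max_eq_left (by omega)]
  | cons y ys ih =>
    intro x cnt ans h1 h2
    by_cases hy : y = x
    · have hfst := headRun_fst_pos x ys
      simp only [headRun, scanA, hy, if_true]
      rw [ih x (cnt + 1) (if ans < cnt + 1 then cnt + 1 else ans) (by omega) (by omega)]
      have key : max (if ans < cnt + 1 then cnt + 1 else ans) (cnt + 1 + (headRun x ys).1 - 1)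
          = max ans (cnt + ((headRun x ys).1 + 1) - 1) := by
        simp only [max_def]; split_ifs <;> omega
      cases hrest : (headRun x ys).2 with
      | nil => simp only [key]
      | cons z zs => simp only [key]
    · simp only [headRun, scanA, if_neg hy]
      have e1 : (if ans < 1 then 1 else ans) = ans := by omega
      have e2 : max ans (cnt + 1 - 1) = ans := max_eq_left (by omega)
      rw [e1, e2]

-- scanA equals "max over run lengths", the shape of B's per-line pass
lemma scan_group (M : List String) (x : String) (ans : Int) (h : 1 ≤ ans) :
    scanA x 1 ans M = (groupLens (x :: M)).foldl max ans := by
  rw [scan_run M x 1 ans (by omega) h]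
  have hc := headRun_fst_pos x M
  have e : (1 : Int) + (headRun x M).1 - 1 = (headRun x M).1 := by ring
  rw [e]
  have hg : groupLens (x :: M) = (headRun x M).1 :: groupLens (headRun x M).2 := by
    rw [groupLens]
  cases hrest : (headRun x M).2 with
  | nil =>
    show max ans (headRun x M).1 = _
    rw [hg, hrest]
    simp [groupLens]
  | cons y ys =>
    show scanA y 1 (max ans (headRun x M).1) ys = _
    have hlen : ys.length < M.length := by
      have := headRun_rest_length x M
      rw [hrest] at this; simp at this; omega
    rw [scan_group ys y (max ans (headRun x M).1) (le_trans h (le_max_left _ _))]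
    rw [hg, hrest, List.foldl_cons]
termination_by M.length

-- congruence for the outer fold, carrying the invariant 1 ≤ ans
lemma outer_congr (I : List Int) : ∀ (F G : Int → Int → Int) (ans : Int), 1 ≤ ans →
    (∀ i a, 1 ≤ a → F a i = G a i ∧ a ≤ G a i) →
    I.foldl F ans = I.foldl G ans ∧ 1 ≤ I.foldl F ans := by
  induction I with
  | nil => intro F G ans h _; exact ⟨rfl, h⟩
  | cons i I ih =>
    intro F G ans h hFG
    obtain ⟨heq, hle⟩ := hFG i ans h
    simp only [List.foldl_cons, heq]
    exact ih F G (G ans i) (by omega) hFG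

-- per-line equality: A's inner loop = max over run lengths of the built line, for n ≥ 2
lemma inner_line (g : Int → String) (n : Int) (hn : 2 ≤ n) (ans : Int) (h : 1 ≤ ans) :
    ((PySem.List.pyRange 1 n 1).foldl (fun (s : Int × Int) j =>
        let c : Int := if g j = g (j - 1) then s.1 + 1 else 1
        (c, if s.2 < c then c else s.2)) (1, ans)).2
    = (groupLens ((PySem.List.pyRange 0 n 1).map g)).foldl max ans := by
  have hm : n = 1 + ((n - 1).toNat : Int) := by omega
  rw [hm, idx_scan g (n - 1).toNat 1 1 ans]
  have h0 : (1 : Int) - 1 = 0 := by ring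
  rw [h0, scan_group _ _ _ h]
  have : PySem.List.pyRange 0 (1 + ((n - 1).toNat : Int)) 1
      = 0 :: PySem.List.pyRange 1 (1 + ((n - 1).toNat : Int)) 1 := by
    apply PySem.List.pyRange_one_cons; omega
  rw [this, List.map_cons]

-- ===== VERDICT (by name: the statement is the Claim_ definition above) =====
theorem make_sum_spec : Claim_equal_make_sum := by
  intro a start_row end_row start_col end_col _dom _pre
  unfold Spec_make_sum make_sum make_sum_alt
  by_cases hn : (a.length : Int) < 2
  · -- n < 2: both inner loops are empty, A folds the identity from 1; B returns 1
    rw [if_pos hn]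
    rw [PySem.List.pyRange_one_eq_nil (a := 1) (b := (a.length : Int)) (by omega)]
    simp
  · rw [if_neg hn]
    have hn2 : 2 ≤ (a.length : Int) := by omega
    rw [List.foldl_append, List.foldl_map, List.foldl_map]
    have hrow := outer_congr (PySem.List.pyRange start_row (end_row + 1) 1)
      (fun ans i =>
        ((PySem.List.pyRange 1 (a.length : Int) 1).foldl (fun (s : Int × Int) j =>
          let cnt : Int := if getS a i j = getS a i (j - 1) then s.1 + 1 else 1
          (cnt, if s.2 < cnt then cnt else s.2)) (1, ans)).2)
      (fun ans i =>
        (groupLens ((PySem.List.pyRange 0 (a.length : Int) 1).map (fun j => getS a i j))).foldl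
          (fun b r => max b r) ans) 1 (by omega)
      (by
        intro i aa ha
        refine ⟨inner_line (fun j => getS a i j) _ hn2 aa ha, ?_⟩
        exact (PySem.List.le_foldl_max _ aa).1)
    obtain ⟨heq1, hge1⟩ := hrow
    rw [heq1] at hge1 ⊢
    have hcol := outer_congr (PySem.List.pyRange start_col (end_col + 1) 1)
      (fun ans i =>
        ((PySem.List.pyRange 1 (a.length : Int) 1).foldl (fun (s : Int × Int) j =>
          let cnt : Int := if getS a j i = getS a (j - 1) i then s.1 + 1 else 1
          (cnt, if s.2 < cnt then cnt else s.2)) (1, ans)).2)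
      (fun ans i =>
        (groupLens ((PySem.List.pyRange 0 (a.length : Int) 1).map (fun j => getS a j i))).foldl
          (fun b r => max b r) ans) _ hge1
      (by
        intro i aa ha
        refine ⟨inner_line (fun j => getS a j i) _ hn2 aa ha, ?_⟩
        exact (PySem.List.le_foldl_max _ aa).1)
    exact hcol.1
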